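-- pv_equiv track=rewrite | github.com/douphealth/openclaw-config-001 | scripts/seo/keyword-research.py | geo_relevance
-- ===== SOURCE A (Python) =====
-- def geo_relevance(keyword):
--     """Score GEO relevance (1-5) for AI search visibility."""
--     kw_lower = keyword.lower()
--     if any(w in kw_lower for w in ['what is', 'definition', 'meaning', 'vs', 'versus', 'difference']):
--         return 5
--     if any(w in kw_lower for w in ['how to', 'how do', 'steps', 'tutorial']):
--         return 4
--     if any(w in kw_lower for w in ['best', 'top', 'comparison', 'review']):
--         return 3
--     if any(w in kw_lower for w in ['near me', 'local', 'hire', 'service']):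
--         return 2
--     return 1
-- ===== SOURCE B (Python) =====
-- _PHRASE_SCORES = [
--     ('what is', 5), ('definition', 5), ('meaning', 5), ('vs', 5), ('versus', 5), ('difference', 5),
--     ('how to', 4), ('how do', 4), ('steps', 4), ('tutorial', 4),
--     ('best', 3), ('top', 3), ('comparison', 3), ('review', 3),
--     ('near me', 2), ('local', 2), ('hire', 2), ('service', 2),
-- ]
--
--
-- def geo_relevance(keyword):
--     """Score GEO relevance (1-5) for AI search visibility."""
--     kw = keyword.lower()
--     best = 1
--     for i in range(len(kw)):
--         for phrase, score in _PHRASE_SCORES: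
--             if score > best and kw.startswith(phrase, i):
--                 best = score
--     return best
-- ===== Notes on version B (the rewrite author's own statement) =====
-- stated objective: alternative
-- what changed: Replaces the four per-tier substring-membership tests with a single position scan: one flat (phrase, score) table, and for every start index of the lowercased keyword a startswith check at that offset updating a running best score.
import Mathlib
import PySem

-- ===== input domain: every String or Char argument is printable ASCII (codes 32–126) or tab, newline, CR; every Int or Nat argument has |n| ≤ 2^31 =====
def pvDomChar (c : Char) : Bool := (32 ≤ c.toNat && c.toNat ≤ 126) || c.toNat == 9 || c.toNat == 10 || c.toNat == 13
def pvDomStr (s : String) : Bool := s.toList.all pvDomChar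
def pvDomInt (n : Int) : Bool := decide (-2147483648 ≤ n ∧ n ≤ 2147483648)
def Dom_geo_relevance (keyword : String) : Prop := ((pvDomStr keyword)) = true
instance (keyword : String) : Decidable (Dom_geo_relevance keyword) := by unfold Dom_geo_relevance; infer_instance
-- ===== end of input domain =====

-- B replaces A's per-tier substring-membership tests with a single position scan over the
-- lowercased keyword: a flat (phrase, score) table and a hand-rolled startswith at each index,
-- keeping a running best (objective: alternative).

-- ===== PORT A =====
def tier5 : List String := ["what is", "definition", "meaning", "vs", "versus", "difference"]
def tier4 : List String := ["how to", "how do", "steps", "tutorial"]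
def tier3 : List String := ["best", "top", "comparison", "review"]
def tier2 : List String := ["near me", "local", "hire", "service"]

-- any(w in kw_lower for w in ws)
def anyIn (ws : List String) (s : String) : Bool := ws.any (fun w => PySem.Str.isIn w s)

def geo_relevance (keyword : String) : Int :=
  let kw_lower := PySem.Str.lower keyword
  if anyIn tier5 kw_lower then 5
  else if anyIn tier4 kw_lower then 4
  else if anyIn tier3 kw_lower then 3
  else if anyIn tier2 kw_lower then 2
  else 1

-- ===== PORT B =====
def phraseScores : List (String × Int) :=
  [ ("what is", 5), ("definition", 5), ("meaning", 5), ("vs", 5), ("versus", 5), ("difference", 5)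
  , ("how to", 4), ("how do", 4), ("steps", 4), ("tutorial", 4)
  , ("best", 3), ("top", 3), ("comparison", 3), ("review", 3)
  , ("near me", 2), ("local", 2), ("hire", 2), ("service", 2) ]

def geo_relevance_alt (keyword : String) : Int :=
  let kw := PySem.Str.lower keyword
  (PySem.List.pyRange 0 (PySem.Str.len kw) 1).foldl
    (fun best i =>
      phraseScores.foldl
        (fun best e =>
          -- kw.startswith(phrase, i): exact as a prefix test on kw.toList.drop i.toNat,
          -- since range(len(kw)) only yields 0 ≤ i < len(kw)
          if decide (e.2 > best) && PySem.Chars.startswith (kw.toList.drop i.toNat) e.1.toList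
          then e.2 else best)
        best)
    1

-- ===== PRECONDITION & SPEC =====
def Spec_geo_relevance (keyword : String) (out : Int) : Prop := out = geo_relevance_alt keyword
instance (keyword : String) (out : Int) : Decidable (Spec_geo_relevance keyword out) := by unfold Spec_geo_relevance; infer_instance

-- ===== CLAIM (what is proved, stated in full; the proofs are below) =====
def Claim_equal_geo_relevance : Prop := ∀ (keyword : String), Dom_geo_relevance keyword → Spec_geo_relevance keyword (geo_relevance keyword)

-- ===== LEMMAS AND PROOFS =====

-- The 'score > best' guard makes the inner fold a running max over matched entries.
theorem inner_eq_max (c : String × Int → Bool) :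
    ∀ (l : List (String × Int)) (b : Int),
      l.foldl (fun b e => if decide (e.2 > b) && c e then e.2 else b) b
        = l.foldl (fun b e => if c e then max b e.2 else b) b := by
  intro l
  induction l with
  | nil => intro b; rfl
  | cons e t ih =>
    intro b
    simp only [List.foldl_cons]
    have : (if decide (e.2 > b) && c e then e.2 else b) = (if c e then max b e.2 else b) := by
      cases hc : c e
      · simp
      · simp; omega
    rw [this, ih]
  
-- generic facts about the running-max fold
theorem mxfold_le_init (c : String × Int → Bool) :
    ∀ (l : List (String × Int)) (b : Int),
      b ≤ l.foldl (fun b e => if c e then max b e.2 else b) b := by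
  intro l
  induction l with
  | nil => intro b; simp
  | cons e t ih =>
    intro b
    simp only [List.foldl_cons]
    refine le_trans ?_ (ih _)
    split <;> omega

theorem mxfold_ge_hit (c : String × Int → Bool) :
    ∀ (l : List (String × Int)) (b : Int) (e : String × Int),
      e ∈ l → c e = true →
      e.2 ≤ l.foldl (fun b e => if c e then max b e.2 else b) b := by
  intro l
  induction l with
  | nil => intro b e he; simp at he
  | cons x t ih =>
    intro b e he hc
    simp only [List.foldl_cons]
    rcases List.mem_cons.mp he with rfl | hmem
    · refine le_trans ?_ (mxfold_le_init c t _)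
      simp [hc]
    · exact ih _ e hmem hc

theorem mxfold_le_bound (c : String × Int → Bool) :
    ∀ (l : List (String × Int)) (b u : Int),
      b ≤ u → (∀ e ∈ l, c e = true → e.2 ≤ u) →
      l.foldl (fun b e => if c e then max b e.2 else b) b ≤ u := by
  intro l
  induction l with
  | nil => intro b u hb _; simpa
  | cons x t ih =>
    intro b u hb hall
    simp only [List.foldl_cons]
    refine ih _ u ?_ (fun e he hc => hall e (List.mem_cons_of_mem _ he) hc)
    cases hc : c x
    · simpa
    · have := hall x List.mem_cons_self hc
      simp; omega

-- the same three facts for the outer fold over the index range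
theorem outer_le_init (c : Int → String × Int → Bool) (l : List (String × Int)) :
    ∀ (is : List Int) (b : Int),
      b ≤ is.foldl (fun b i => l.foldl (fun b e => if c i e then max b e.2 else b) b) b := by
  intro is
  induction is with
  | nil => intro b; simp
  | cons i t ih =>
    intro b
    simp only [List.foldl_cons]
    exact le_trans (mxfold_le_init _ l b) (ih _)

theorem outer_ge_hit (c : Int → String × Int → Bool) (l : List (String × Int)) :
    ∀ (is : List Int) (b i : Int) (e : String × Int),
      i ∈ is → e ∈ l → c i e = true →
      e.2 ≤ is.foldl (fun b i => l.foldl (fun b e => if c i e then max b e.2 else b) b) b := by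
  intro is
  induction is with
  | nil => intro b i e hi; simp at hi
  | cons j t ih =>
    intro b i e hi he hc
    simp only [List.foldl_cons]
    rcases List.mem_cons.mp hi with rfl | hmem
    · exact le_trans (mxfold_ge_hit _ l b e he hc) (outer_le_init c l t _)
    · exact ih _ i e hmem he hc

theorem outer_le_bound (c : Int → String × Int → Bool) (l : List (String × Int)) :
    ∀ (is : List Int) (b u : Int),
      b ≤ u → (∀ i ∈ is, ∀ e ∈ l, c i e = true → e.2 ≤ u) →
      is.foldl (fun b i => l.foldl (fun b e => if c i e then max b e.2 else b) b) b ≤ u := by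
  intro is
  induction is with
  | nil => intro b u hb _; simpa
  | cons j t ih =>
    intro b u hb hall
    simp only [List.foldl_cons]
    refine ih _ u ?_ (fun i hi e he hc => hall i (List.mem_cons_of_mem _ hi) e he hc)
    exact mxfold_le_bound _ l b u hb (fun e he hc => hall j List.mem_cons_self e he hc)

-- 'w in s' ↔ w matches at some index of range(len(s)), for nonempty w
theorem isIn_iff_match (w : String) (s : String) (hw : w.toList ≠ []) :
    PySem.Str.isIn w s = true ↔
      ∃ i : Int, i ∈ PySem.List.pyRange 0 ((s.toList.length : Nat) : Int) 1 ∧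
        PySem.Chars.startswith (s.toList.drop i.toNat) w.toList = true := by
  constructor
  · intro h
    have h' : PySem.Chars.isIn w.toList s.toList = true := by simpa using h
    obtain ⟨j, hj⟩ := (PySem.Chars.exists_prefix_drop_iff_isIn _ _).mpr h'
    have hjlt : j < s.toList.length := by
      by_contra hge
      rw [not_lt] at hge
      rw [List.drop_eq_nil_of_le hge] at hj
      exact hw (List.prefix_nil.mp hj)
    refine ⟨(j : Int), ?_, ?_⟩
    · rw [PySem.List.mem_pyRange_one]
      constructor <;> [positivity; exact_mod_cast hjlt]
    · rw [PySem.Chars.startswith_iff]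
      simpa using hj
  · rintro ⟨i, hi, hsw⟩
    have hpre := (PySem.Chars.startswith_iff _ _).mp hsw
    have : PySem.Chars.isIn w.toList s.toList = true :=
      (PySem.Chars.exists_prefix_drop_iff_isIn _ _).mp ⟨i.toNat, hpre⟩
    simpa using this

-- A's value is at least s whenever the tier-s membership test fires
theorem geo_ge5 (keyword : String) (h : anyIn tier5 (PySem.Str.lower keyword) = true) :
    geo_relevance keyword = 5 := by
  simp [geo_relevance, h]

theorem geo_ge4 (keyword : String) (h : anyIn tier4 (PySem.Str.lower keyword) = true) :
    4 ≤ geo_relevance keyword := by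
  simp only [geo_relevance, h, if_true]
  split <;> omega

theorem geo_ge3 (keyword : String) (h : anyIn tier3 (PySem.Str.lower keyword) = true) :
    3 ≤ geo_relevance keyword := by
  simp only [geo_relevance, h, if_true]
  split_ifs <;> omega

theorem geo_ge2 (keyword : String) (h : anyIn tier2 (PySem.Str.lower keyword) = true) :
    2 ≤ geo_relevance keyword := by
  simp only [geo_relevance, h, if_true]
  split_ifs <;> omega

theorem geo_ge1 (keyword : String) : 1 ≤ geo_relevance keyword := by
  simp only [geo_relevance]
  split_ifs <;> omega

-- tier membership carries over to the flat table
theorem mem_table5 (w : String) (h : w ∈ tier5) : (w, (5:Int)) ∈ phraseScores := by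
  fin_cases h <;> decide
theorem mem_table4 (w : String) (h : w ∈ tier4) : (w, (4:Int)) ∈ phraseScores := by
  fin_cases h <;> decide
theorem mem_table3 (w : String) (h : w ∈ tier3) : (w, (3:Int)) ∈ phraseScores := by
  fin_cases h <;> decide
theorem mem_table2 (w : String) (h : w ∈ tier2) : (w, (2:Int)) ∈ phraseScores := by
  fin_cases h <;> decide

theorem table_nonempty (e : String × Int) (h : e ∈ phraseScores) : e.1.toList ≠ [] := by
  fin_cases h <;> decide

-- every table entry belongs to the tier of its score
theorem table_tier (e : String × Int) (h : e ∈ phraseScores) :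
    (e.2 = 5 ∧ e.1 ∈ tier5) ∨ (e.2 = 4 ∧ e.1 ∈ tier4) ∨
    (e.2 = 3 ∧ e.1 ∈ tier3) ∨ (e.2 = 2 ∧ e.1 ∈ tier2) := by
  fin_cases h <;> simp [tier5, tier4, tier3, tier2]

theorem anyIn_of_mem (t : List String) (w : String) (s : String)
    (hw : w ∈ t) (h : PySem.Str.isIn w s = true) : anyIn t s = true :=
  List.any_eq_true.mpr ⟨w, hw, h⟩

-- ===== VERDICT (by name: the statement is the Claim_ definition above) =====
theorem geo_relevance_spec : Claim_equal_geo_relevance := by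
  intro keyword _
  show geo_relevance keyword = geo_relevance_alt keyword
  set s := PySem.Str.lower keyword with hs
  set c : Int → String × Int → Bool :=
    fun i e => PySem.Chars.startswith (s.toList.drop i.toNat) e.1.toList with hc
  have hBalt : geo_relevance_alt keyword =
      (PySem.List.pyRange 0 ((s.toList.length : Nat) : Int) 1).foldl
        (fun b i => phraseScores.foldl (fun b e => if c i e then max b e.2 else b) b) 1 := by
    simp only [geo_relevance_alt, ← hs]
    rw [PySem.List.foldl_congr_mem _ _ _ _ (fun b i _ => inner_eq_max (c i) phraseScores b)]
    simp [PySem.Str.len]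
  rw [hBalt]
  set R := PySem.List.pyRange 0 ((s.toList.length : Nat) : Int) 1 with hR
  set F := R.foldl
      (fun b i => phraseScores.foldl (fun b e => if c i e then max b e.2 else b) b) 1 with hF
  -- lower bound: A ≤ B
  have hAleB : geo_relevance keyword ≤ F := by
    have hit : ∀ (t : List String) (v : Int), (∀ w ∈ t, (w, v) ∈ phraseScores) →
        anyIn t s = true → v ≤ F := by
      intro t v hmem h
      obtain ⟨w, hw, hin⟩ := List.any_eq_true.mp h
      have hwne : w.toList ≠ [] := table_nonempty (w, v) (hmem w hw)
      obtain ⟨i, hi, hsw⟩ := (isIn_iff_match w s hwne).mp hin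
      exact outer_ge_hit c phraseScores R 1 i (w, v) hi (hmem w hw) hsw
    by_cases h5 : anyIn tier5 s = true
    · rw [geo_ge5 keyword h5]; exact hit tier5 5 mem_table5 h5
    · by_cases h4 : anyIn tier4 s = true
      · calc geo_relevance keyword = 4 := by
              simp [geo_relevance, ← hs, h5, h4]
          _ ≤ F := hit tier4 4 mem_table4 h4
      · by_cases h3 : anyIn tier3 s = true
        · calc geo_relevance keyword = 3 := by
                simp [geo_relevance, ← hs, h5, h4, h3]
            _ ≤ F := hit tier3 3 mem_table3 h3
        · by_cases h2 : anyIn tier2 s = true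
          · calc geo_relevance keyword = 2 := by
                  simp [geo_relevance, ← hs, h5, h4, h3, h2]
              _ ≤ F := hit tier2 2 mem_table2 h2
          · calc geo_relevance keyword = 1 := by
                  simp [geo_relevance, ← hs, h5, h4, h3, h2]
              _ ≤ F := outer_le_init c phraseScores R 1
  -- upper bound: B ≤ A
  have hBleA : F ≤ geo_relevance keyword := by
    refine outer_le_bound c phraseScores R 1 _ (geo_ge1 keyword) ?_
    intro i hi e he hce
    have hwne := table_nonempty e he
    have hin : PySem.Str.isIn e.1 s = true :=
      (isIn_iff_match e.1 s hwne).mpr ⟨i, by rwa [← hR], hce⟩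
    rcases table_tier e he with ⟨hv, ht⟩ | ⟨hv, ht⟩ | ⟨hv, ht⟩ | ⟨hv, ht⟩ <;> rw [hv]
    · exact le_of_eq (geo_ge5 keyword (anyIn_of_mem _ _ _ ht hin)).symm
    · exact geo_ge4 keyword (anyIn_of_mem _ _ _ ht hin)
    · exact geo_ge3 keyword (anyIn_of_mem _ _ _ ht hin)
    · exact geo_ge2 keyword (anyIn_of_mem _ _ _ ht hin)
  omega
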